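-- pv_equiv track=rewrite | github.com/suarezgil-k/BA_DeepfakeFaces | data/Embeddings/scripts/create_subsets_ba.py | list2classdict
-- ===== SOURCE A (Python) =====
-- def list2classdict(class_paths):
--     class_dict = {}
--     for i in class_paths:
--         class_id = i.split("/")[-2]
--         if class_id not in class_dict:
--             class_dict[class_id] = [i]
--         else:
--             class_dict[class_id].append(i)
--     return class_dict
-- ===== SOURCE B (Python) =====
-- def list2classdict(class_paths):
--     # two-pass: first collect class ids in first-occurrence order, then
--     # build each group by filtering the whole list on its class id
--     keys = []
--     for p in class_paths:
--         k = p.split("/")[-2]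
--         if k not in keys:
--             keys.append(k)
--     return {k: [p for p in class_paths if p.split("/")[-2] == k] for k in keys}
-- ===== Notes on version B (the rewrite author's own statement) =====
-- stated objective: alternative
-- what changed: Replaces A's single hash-insertion pass (lookup-and-append per element) with a two-pass decomposition: one pass deduplicates class ids in first-occurrence order, then each group is produced by filtering the whole list on its class id.
import Mathlib
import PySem

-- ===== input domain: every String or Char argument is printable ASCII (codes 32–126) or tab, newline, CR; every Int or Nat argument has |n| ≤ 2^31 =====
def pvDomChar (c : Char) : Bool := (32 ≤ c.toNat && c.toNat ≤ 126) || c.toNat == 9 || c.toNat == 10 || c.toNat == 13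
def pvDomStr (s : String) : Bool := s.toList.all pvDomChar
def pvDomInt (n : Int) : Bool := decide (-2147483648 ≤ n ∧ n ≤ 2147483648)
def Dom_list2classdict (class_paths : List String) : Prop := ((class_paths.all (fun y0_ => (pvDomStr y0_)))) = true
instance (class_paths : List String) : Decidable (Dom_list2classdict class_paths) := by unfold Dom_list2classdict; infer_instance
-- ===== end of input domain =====

-- B replaces A's single hash-insertion pass by a dedup-keys pass plus one filter per class id (alternative algorithm, same results).

-- ===== PORT A =====
-- i.split("/")[-2]; none = IndexError (path without "/"), excluded by Pre_
def pvKey (p : String) : Option String :=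
  PySem.List.pyGet? ((PySem.Str.split? p "/").getD []) (-2)

def list2classdict (class_paths : List String) : List (String × List String) :=
  (class_paths.foldl (fun d i =>
      match pvKey i with
      | none => d
      | some cid =>
        if d.contains cid = false then d.insert cid [i]
        else d.insert cid (d.getD cid [] ++ [i]))
    (PySem.Dict.empty : PySem.Dict String (List String))).items

-- ===== PORT B =====
def list2classdict_alt (class_paths : List String) : List (String × List String) :=
  let keys := class_paths.foldl (fun ks p =>
      match pvKey p with
      | none => ks
      | some k => if k ∈ ks then ks else ks ++ [k]) ([] : List String)
  keys.map (fun k => (k, class_paths.filter (fun p => pvKey p == some k)))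

-- ===== PRECONDITION & SPEC =====
-- Pre_ excludes exactly the inputs where A raises IndexError: a path with no "/" makes split("/")[-2] raise.
def Pre_list2classdict (class_paths : List String) : Prop :=
  ∀ p ∈ class_paths, 2 ≤ ((PySem.Str.split? p "/").getD []).length
instance (class_paths : List String) : Decidable (Pre_list2classdict class_paths) := by
  unfold Pre_list2classdict; infer_instance

def pvWitness_list2classdict : List String := ["data/a/1.png", "data/b/2.png", "data/a/3.png"]

def Spec_list2classdict (class_paths : List String) (out : List (String × List String)) : Prop := out = list2classdict_alt class_paths
instance (class_paths : List String) (out : List (String × List String)) : Decidable (Spec_list2classdict class_paths out) := by unfold Spec_list2classdict; infer_instance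

-- ===== CLAIM (what is proved, stated in full; the proofs are below) =====
def Claim_equal_list2classdict : Prop := ∀ (class_paths : List String), Dom_list2classdict class_paths → Pre_list2classdict class_paths → Spec_list2classdict class_paths (list2classdict class_paths)

-- ===== LEMMAS AND PROOFS =====

-- the two loop bodies, named for the proofs
def pvStepA (d : PySem.Dict String (List String)) (i : String) : PySem.Dict String (List String) :=
  match pvKey i with
  | none => d
  | some cid =>
    if d.contains cid = false then d.insert cid [i]
    else d.insert cid (d.getD cid [] ++ [i])

def pvStepK (ks : List String) (p : String) : List String :=
  match pvKey p with
  | none => ks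
  | some k => if k ∈ ks then ks else ks ++ [k]

lemma pvStepK_mono (ks : List String) (xs : List String) (a : String) (h : a ∈ ks) :
    a ∈ xs.foldl pvStepK ks := by
  induction xs generalizing ks with
  | nil => exact h
  | cons x xs ih =>
    refine ih _ ?_
    cases hx : pvKey x with
    | none => simpa [pvStepK, hx] using h
    | some k =>
      simp only [pvStepK, hx]
      split
      · exact h
      · simp [h]

lemma pvStepK_mem (ks : List String) (xs : List String) (p : String) (k : String)
    (hp : p ∈ xs) (hk : pvKey p = some k) : k ∈ xs.foldl pvStepK ks := by
  induction xs generalizing ks with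
  | nil => cases hp
  | cons x xs ih =>
    rcases List.mem_cons.mp hp with hp | hp
    · subst hp
      rw [List.foldl_cons]
      refine pvStepK_mono (pvStepK ks p) xs k ?_
      unfold pvStepK
      rw [hk]
      by_cases hm : k ∈ ks
      · simp [hm]
      · simp [hm]
    · exact ih _ hp

lemma pvStepK_nodup (ks : List String) (xs : List String) (h : ks.Nodup) :
    (xs.foldl pvStepK ks).Nodup := by
  induction xs generalizing ks with
  | nil => exact h
  | cons x xs ih =>
    refine ih _ ?_
    cases hx : pvKey x with
    | none => simpa [pvStepK, hx] using h
    | some k =>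
      simp only [pvStepK, hx]
      split
      · exact h
      · rename_i hnm
        have hne : ∀ a ∈ ks, ¬a = k := fun a ha e => hnm (e ▸ ha)
        simp only [List.nodup_append, h]
        simpa using hne

lemma pv_main (xs : List String) (h : ∀ p ∈ xs, (pvKey p).isSome) :
    (xs.foldl pvStepA PySem.Dict.empty).items =
      (xs.foldl pvStepK []).map (fun k => (k, xs.filter (fun p => pvKey p == some k))) := by
  induction xs using List.reverseRecOn with
  | nil => rfl
  | append_singleton xs p ih =>
    have hxs : ∀ q ∈ xs, (pvKey q).isSome := fun q hq => h q (by simp [hq])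
    have hp : (pvKey p).isSome := h p (by simp)
    obtain ⟨k, hk⟩ := Option.isSome_iff_exists.mp hp
    have ihx := ih hxs
    set K := xs.foldl pvStepK [] with hK
    have hKnd : K.Nodup := pvStepK_nodup [] xs (by simp)
    have hkeys : (xs.foldl pvStepA PySem.Dict.empty).keys = K := by
      show ((xs.foldl pvStepA PySem.Dict.empty).items).map (·.1) = K
      rw [ihx]; simp [Function.comp_def]
    rw [List.foldl_append, List.foldl_append]
    simp only [List.foldl_cons, List.foldl_nil]
    simp only [pvStepA, pvStepK, hk]
    by_cases hmem : k ∈ K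
    · -- existing key: A replaces the value in place, B's key list is unchanged
      have hcont : (xs.foldl pvStepA PySem.Dict.empty).contains k = true := by
        rw [PySem.Dict.contains_iff_mem_keys, hkeys]; exact hmem
      rw [if_neg (by simp [hcont]), if_pos hmem]
      have hval : (xs.foldl pvStepA PySem.Dict.empty).getD k []
          = xs.filter (fun p => pvKey p == some k) := by
        refine PySem.Dict.getD_of_mem_items _ ?_ (by rw [hkeys]; exact hKnd) []
        rw [ihx]; exact List.mem_map_of_mem hmem
      rw [PySem.Dict.items_insert_of_contains _ _ hcont, ihx, hval, List.map_map]
      refine (List.map_congr_left (fun a ha => ?_)).symm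
      by_cases hak : a = k
      · subst hak
        simp [List.filter_append, hk]
      · simp [Function.comp, List.filter_append, hk, hak, Ne.symm hak, beq_iff_eq]
    · -- fresh key: A appends the entry, B appends the key
      have hcont : (xs.foldl pvStepA PySem.Dict.empty).contains k = false := by
        rw [Bool.eq_false_iff]
        intro hc
        rw [PySem.Dict.contains_iff_mem_keys, hkeys] at hc
        exact hmem hc
      rw [if_pos (by simp [hcont]), if_neg hmem]
      rw [PySem.Dict.items_insert_of_not_contains _ _ hcont, ihx]
      have hnofilt : xs.filter (fun p => pvKey p == some k) = [] := by
        refine List.filter_eq_nil_iff.mpr (fun q hq => ?_)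
        simp only [beq_iff_eq]
        intro hqk
        exact hmem (pvStepK_mem [] xs q k hq hqk)
      rw [List.map_append]
      congr 1
      · refine (List.map_congr_left (fun a ha => ?_)).symm
        have hak : a ≠ k := fun e => hmem (e ▸ ha)
        simp [List.filter_append, hk, Ne.symm hak, beq_iff_eq]
      · simp [List.filter_append, hk, hnofilt]

-- ===== VERDICT (by name: the statement is the Claim_ definition above) =====
theorem list2classdict_spec : Claim_equal_list2classdict := by
  intro class_paths _ hpre
  unfold Spec_list2classdict list2classdict list2classdict_alt
  have h : ∀ p ∈ class_paths, (pvKey p).isSome := by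
    intro p hp
    have h2 := hpre p hp
    rw [Option.isSome_iff_ne_none]
    intro hnone
    rw [pvKey, PySem.List.pyGet?_eq_none_iff] at hnone
    exact hnone (by constructor <;> omega)
  simpa [pvStepA, pvStepK] using pv_main class_paths h
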